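-- pv_equiv track=rewrite | github.com/dsweet99/dryer | tests/benchmark_data/module_020.py | compute_20_6
-- ===== SOURCE A (Python) =====
-- def compute_20_6(a, b, c):
--     x = a * 359 + b * 304
--     y = c * 253 - a * 210
--     for i in range(11):
--         x = x + i * 67
--         y = y - i * 33
--         if x > 7060:
--             x = x % 2030
--     return x + y + 121
-- ===== SOURCE B (Python) =====
-- def compute_20_6(a, b, c):
--     # y is independent of the loop's branch: it ends at c*253 - a*210 - 33*55 = c*253 - a*210 - 1815.
--     # For x: once `x %= 2030` fires, x < 2030 and the remaining additions total < 7060,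
--     # so the reduction happens AT MOST ONCE -- at the first i with x0 + 67*i*(i+1)//2 > 7060.
--     x0 = a * 359 + b * 304
--     x = x0 + 3685  # 67 * (0+1+...+10), if the threshold is never crossed
--     for i in range(11):
--         s = 67 * i * (i + 1) // 2
--         if x0 + s > 7060:
--             x = (x0 + s) % 2030 + (3685 - s)
--             break
--     return x + (c * 253 - a * 210 - 1815) + 121
-- ===== Notes on version B (the rewrite author's own statement) =====
-- stated objective: alternative
-- what changed: B replaces the accumulating loop by a closed form for y and, for x, a search for the first (and provably only) step where the threshold 7060 is crossed, applying the single modulo reduction there directly.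
import Mathlib
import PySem

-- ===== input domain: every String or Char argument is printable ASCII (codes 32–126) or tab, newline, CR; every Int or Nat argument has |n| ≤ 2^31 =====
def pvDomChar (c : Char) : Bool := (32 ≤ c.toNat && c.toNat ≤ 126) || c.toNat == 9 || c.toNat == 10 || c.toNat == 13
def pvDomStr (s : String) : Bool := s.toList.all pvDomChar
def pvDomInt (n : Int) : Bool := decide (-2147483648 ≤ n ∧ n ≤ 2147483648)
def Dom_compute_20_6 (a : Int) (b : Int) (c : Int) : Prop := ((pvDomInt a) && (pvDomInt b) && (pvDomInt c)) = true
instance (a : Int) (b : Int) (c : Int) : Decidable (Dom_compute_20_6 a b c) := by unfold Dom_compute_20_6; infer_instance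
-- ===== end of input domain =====

-- B replaces A's 11-step accumulation by a closed form for y plus a first-crossing search for x's single modulo reduction; same cost, different structure.

-- ===== PORT A =====
-- A's for-loop, as structural recursion over the range list with state (x, y)
def loopA : List Int → Int → Int → Int × Int
  | [], x, y => (x, y)
  | i :: rest, x, y =>
      loopA rest
        (if x + i * 67 > 7060 then PySem.Int.mod (x + i * 67) 2030 else x + i * 67)
        (y - i * 33)

def compute_20_6 (a : Int) (b : Int) (c : Int) : Int :=
  let x := a * 359 + b * 304
  let y := c * 253 - a * 210
  let p := loopA (PySem.List.pyRange 0 11 1) x y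
  p.1 + p.2 + 121

-- ===== PORT B =====
-- B's loop with break: return at the first i whose threshold condition holds.
def computeAltX (x0 : Int) : List Int → Int
  | [] => x0 + 3685
  | i :: rest =>
    if x0 + PySem.Int.floordiv (67 * i * (i + 1)) 2 > 7060 then
      PySem.Int.mod (x0 + PySem.Int.floordiv (67 * i * (i + 1)) 2) 2030
        + (3685 - PySem.Int.floordiv (67 * i * (i + 1)) 2)
    else computeAltX x0 rest

def compute_20_6_alt (a : Int) (b : Int) (c : Int) : Int :=
  let x0 := a * 359 + b * 304
  computeAltX x0 (PySem.List.pyRange 0 11 1) + (c * 253 - a * 210 - 1815) + 121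

-- ===== PRECONDITION & SPEC =====
def Spec_compute_20_6 (a : Int) (b : Int) (c : Int) (out : Int) : Prop := out = compute_20_6_alt a b c
instance (a : Int) (b : Int) (c : Int) (out : Int) : Decidable (Spec_compute_20_6 a b c out) := by unfold Spec_compute_20_6; infer_instance

-- ===== CLAIM (what is proved, stated in full; the proofs are below) =====
def Claim_equal_compute_20_6 : Prop := ∀ (a : Int) (b : Int) (c : Int), Dom_compute_20_6 a b c → Spec_compute_20_6 a b c (compute_20_6 a b c)

-- ===== LEMMAS AND PROOFS =====

theorem pyRange_0_11 : PySem.List.pyRange 0 11 1 = [0,1,2,3,4,5,6,7,8,9,10] := by decide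

theorem pymod_eq (a : Int) : PySem.Int.mod a 2030 = a % 2030 :=
  PySem.Int.mod_eq_emod_of_pos (by norm_num)

-- once x is small enough that the threshold can never be crossed again, the loop is plain accumulation
theorem loopA_small (l : List Int) : ∀ x y : Int, (∀ i ∈ l, 0 ≤ i) → x + 67 * l.sum ≤ 7060 →
    loopA l x y = (x + 67 * l.sum, y - 33 * l.sum) := by
  induction l with
  | nil => intro x y _ _; simp [loopA]
  | cons i rest ih =>
    intro x y hnn hb
    have hi : 0 ≤ i := hnn i (by simp)
    have hrest : 0 ≤ rest.sum := List.sum_nonneg (fun j hj => hnn j (by simp [hj]))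
    simp only [List.sum_cons] at hb
    rw [loopA]
    have hcond : ¬ (x + i * 67 > 7060) := by nlinarith
    rw [if_neg hcond, ih _ _ (fun j hj => hnn j (by simp [hj])) (by linarith)]
    simp only [Prod.mk.injEq, List.sum_cons]
    constructor <;> ring

theorem sval0 : PySem.Int.floordiv (67 * (0:Int) * (0 + 1)) 2 = 0 := by decide
theorem sval1 : PySem.Int.floordiv (67 * (1:Int) * (1 + 1)) 2 = 67 := by decide
theorem sval2 : PySem.Int.floordiv (67 * (2:Int) * (2 + 1)) 2 = 201 := by decide
theorem sval3 : PySem.Int.floordiv (67 * (3:Int) * (3 + 1)) 2 = 402 := by decide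
theorem sval4 : PySem.Int.floordiv (67 * (4:Int) * (4 + 1)) 2 = 670 := by decide
theorem sval5 : PySem.Int.floordiv (67 * (5:Int) * (5 + 1)) 2 = 1005 := by decide
theorem sval6 : PySem.Int.floordiv (67 * (6:Int) * (6 + 1)) 2 = 1407 := by decide
theorem sval7 : PySem.Int.floordiv (67 * (7:Int) * (7 + 1)) 2 = 1876 := by decide
theorem sval8 : PySem.Int.floordiv (67 * (8:Int) * (8 + 1)) 2 = 2412 := by decide
theorem sval9 : PySem.Int.floordiv (67 * (9:Int) * (9 + 1)) 2 = 3015 := by decide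
theorem sval10 : PySem.Int.floordiv (67 * (10:Int) * (10 + 1)) 2 = 3685 := by decide

theorem keyMain (x y : Int) :
    (loopA [0,1,2,3,4,5,6,7,8,9,10] x y).1 + (loopA [0,1,2,3,4,5,6,7,8,9,10] x y).2 =
    computeAltX x [0,1,2,3,4,5,6,7,8,9,10] + y - 1815 := by
  by_cases h0 : x + 0*67 > 7060
  · rw [loopA, if_pos h0]
    rw [loopA_small]
    simp only [computeAltX, sval0]
    rw [if_pos (show x + 0 > 7060 by omega)]
    simp only [List.sum_cons, List.sum_nil, pymod_eq]
    omega
    · decide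
    · simp only [List.sum_cons, List.sum_nil, pymod_eq]
      omega
  · by_cases h1 : x + 0*67 + 1*67 > 7060
    · rw [loopA, if_neg h0, loopA, if_pos h1]
      rw [loopA_small]
      simp only [computeAltX, sval0, sval1]
      rw [if_neg (show ¬ x + 0 > 7060 by omega)]
      rw [if_pos (show x + 67 > 7060 by omega)]
      simp only [List.sum_cons, List.sum_nil, pymod_eq]
      omega
      · decide
      · simp only [List.sum_cons, List.sum_nil, pymod_eq]
        omega
    · by_cases h2 : x + 0*67 + 1*67 + 2*67 > 7060
      · rw [loopA, if_neg h0, loopA, if_neg h1, loopA, if_pos h2]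
        rw [loopA_small]
        simp only [computeAltX, sval0, sval1, sval2]
        rw [if_neg (show ¬ x + 0 > 7060 by omega)]
        rw [if_neg (show ¬ x + 67 > 7060 by omega)]
        rw [if_pos (show x + 201 > 7060 by omega)]
        simp only [List.sum_cons, List.sum_nil, pymod_eq]
        omega
        · decide
        · simp only [List.sum_cons, List.sum_nil, pymod_eq]
          omega
      · by_cases h3 : x + 0*67 + 1*67 + 2*67 + 3*67 > 7060
        · rw [loopA, if_neg h0, loopA, if_neg h1, loopA, if_neg h2, loopA, if_pos h3]
          rw [loopA_small]
          simp only [computeAltX, sval0, sval1, sval2, sval3]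
          rw [if_neg (show ¬ x + 0 > 7060 by omega)]
          rw [if_neg (show ¬ x + 67 > 7060 by omega)]
          rw [if_neg (show ¬ x + 201 > 7060 by omega)]
          rw [if_pos (show x + 402 > 7060 by omega)]
          simp only [List.sum_cons, List.sum_nil, pymod_eq]
          omega
          · decide
          · simp only [List.sum_cons, List.sum_nil, pymod_eq]
            omega
        · by_cases h4 : x + 0*67 + 1*67 + 2*67 + 3*67 + 4*67 > 7060
          · rw [loopA, if_neg h0, loopA, if_neg h1, loopA, if_neg h2, loopA, if_neg h3, loopA, if_pos h4]
            rw [loopA_small]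
            simp only [computeAltX, sval0, sval1, sval2, sval3, sval4]
            rw [if_neg (show ¬ x + 0 > 7060 by omega)]
            rw [if_neg (show ¬ x + 67 > 7060 by omega)]
            rw [if_neg (show ¬ x + 201 > 7060 by omega)]
            rw [if_neg (show ¬ x + 402 > 7060 by omega)]
            rw [if_pos (show x + 670 > 7060 by omega)]
            simp only [List.sum_cons, List.sum_nil, pymod_eq]
            omega
            · decide
            · simp only [List.sum_cons, List.sum_nil, pymod_eq]
              omega
          · by_cases h5 : x + 0*67 + 1*67 + 2*67 + 3*67 + 4*67 + 5*67 > 7060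
            · rw [loopA, if_neg h0, loopA, if_neg h1, loopA, if_neg h2, loopA, if_neg h3, loopA, if_neg h4, loopA, if_pos h5]
              rw [loopA_small]
              simp only [computeAltX, sval0, sval1, sval2, sval3, sval4, sval5]
              rw [if_neg (show ¬ x + 0 > 7060 by omega)]
              rw [if_neg (show ¬ x + 67 > 7060 by omega)]
              rw [if_neg (show ¬ x + 201 > 7060 by omega)]
              rw [if_neg (show ¬ x + 402 > 7060 by omega)]
              rw [if_neg (show ¬ x + 670 > 7060 by omega)]
              rw [if_pos (show x + 1005 > 7060 by omega)]
              simp only [List.sum_cons, List.sum_nil, pymod_eq]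
              omega
              · decide
              · simp only [List.sum_cons, List.sum_nil, pymod_eq]
                omega
            · by_cases h6 : x + 0*67 + 1*67 + 2*67 + 3*67 + 4*67 + 5*67 + 6*67 > 7060
              · rw [loopA, if_neg h0, loopA, if_neg h1, loopA, if_neg h2, loopA, if_neg h3, loopA, if_neg h4, loopA, if_neg h5, loopA, if_pos h6]
                rw [loopA_small]
                simp only [computeAltX, sval0, sval1, sval2, sval3, sval4, sval5, sval6]
                rw [if_neg (show ¬ x + 0 > 7060 by omega)]
                rw [if_neg (show ¬ x + 67 > 7060 by omega)]
                rw [if_neg (show ¬ x + 201 > 7060 by omega)]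
                rw [if_neg (show ¬ x + 402 > 7060 by omega)]
                rw [if_neg (show ¬ x + 670 > 7060 by omega)]
                rw [if_neg (show ¬ x + 1005 > 7060 by omega)]
                rw [if_pos (show x + 1407 > 7060 by omega)]
                simp only [List.sum_cons, List.sum_nil, pymod_eq]
                omega
                · decide
                · simp only [List.sum_cons, List.sum_nil, pymod_eq]
                  omega
              · by_cases h7 : x + 0*67 + 1*67 + 2*67 + 3*67 + 4*67 + 5*67 + 6*67 + 7*67 > 7060
                · rw [loopA, if_neg h0, loopA, if_neg h1, loopA, if_neg h2, loopA, if_neg h3, loopA, if_neg h4, loopA, if_neg h5, loopA, if_neg h6, loopA, if_pos h7]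
                  rw [loopA_small]
                  simp only [computeAltX, sval0, sval1, sval2, sval3, sval4, sval5, sval6, sval7]
                  rw [if_neg (show ¬ x + 0 > 7060 by omega)]
                  rw [if_neg (show ¬ x + 67 > 7060 by omega)]
                  rw [if_neg (show ¬ x + 201 > 7060 by omega)]
                  rw [if_neg (show ¬ x + 402 > 7060 by omega)]
                  rw [if_neg (show ¬ x + 670 > 7060 by omega)]
                  rw [if_neg (show ¬ x + 1005 > 7060 by omega)]
                  rw [if_neg (show ¬ x + 1407 > 7060 by omega)]
                  rw [if_pos (show x + 1876 > 7060 by omega)]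
                  simp only [List.sum_cons, List.sum_nil, pymod_eq]
                  omega
                  · decide
                  · simp only [List.sum_cons, List.sum_nil, pymod_eq]
                    omega
                · by_cases h8 : x + 0*67 + 1*67 + 2*67 + 3*67 + 4*67 + 5*67 + 6*67 + 7*67 + 8*67 > 7060
                  · rw [loopA, if_neg h0, loopA, if_neg h1, loopA, if_neg h2, loopA, if_neg h3, loopA, if_neg h4, loopA, if_neg h5, loopA, if_neg h6, loopA, if_neg h7, loopA, if_pos h8]
                    rw [loopA_small]
                    simp only [computeAltX, sval0, sval1, sval2, sval3, sval4, sval5, sval6, sval7, sval8]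
                    rw [if_neg (show ¬ x + 0 > 7060 by omega)]
                    rw [if_neg (show ¬ x + 67 > 7060 by omega)]
                    rw [if_neg (show ¬ x + 201 > 7060 by omega)]
                    rw [if_neg (show ¬ x + 402 > 7060 by omega)]
                    rw [if_neg (show ¬ x + 670 > 7060 by omega)]
                    rw [if_neg (show ¬ x + 1005 > 7060 by omega)]
                    rw [if_neg (show ¬ x + 1407 > 7060 by omega)]
                    rw [if_neg (show ¬ x + 1876 > 7060 by omega)]
                    rw [if_pos (show x + 2412 > 7060 by omega)]
                    simp only [List.sum_cons, List.sum_nil, pymod_eq]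
                    omega
                    · decide
                    · simp only [List.sum_cons, List.sum_nil, pymod_eq]
                      omega
                  · by_cases h9 : x + 0*67 + 1*67 + 2*67 + 3*67 + 4*67 + 5*67 + 6*67 + 7*67 + 8*67 + 9*67 > 7060
                    · rw [loopA, if_neg h0, loopA, if_neg h1, loopA, if_neg h2, loopA, if_neg h3, loopA, if_neg h4, loopA, if_neg h5, loopA, if_neg h6, loopA, if_neg h7, loopA, if_neg h8, loopA, if_pos h9]
                      rw [loopA_small]
                      simp only [computeAltX, sval0, sval1, sval2, sval3, sval4, sval5, sval6, sval7, sval8, sval9]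
                      rw [if_neg (show ¬ x + 0 > 7060 by omega)]
                      rw [if_neg (show ¬ x + 67 > 7060 by omega)]
                      rw [if_neg (show ¬ x + 201 > 7060 by omega)]
                      rw [if_neg (show ¬ x + 402 > 7060 by omega)]
                      rw [if_neg (show ¬ x + 670 > 7060 by omega)]
                      rw [if_neg (show ¬ x + 1005 > 7060 by omega)]
                      rw [if_neg (show ¬ x + 1407 > 7060 by omega)]
                      rw [if_neg (show ¬ x + 1876 > 7060 by omega)]
                      rw [if_neg (show ¬ x + 2412 > 7060 by omega)]
                      rw [if_pos (show x + 3015 > 7060 by omega)]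
                      simp only [List.sum_cons, List.sum_nil, pymod_eq]
                      omega
                      · decide
                      · simp only [List.sum_cons, List.sum_nil, pymod_eq]
                        omega
                    · by_cases h10 : x + 0*67 + 1*67 + 2*67 + 3*67 + 4*67 + 5*67 + 6*67 + 7*67 + 8*67 + 9*67 + 10*67 > 7060
                      · rw [loopA, if_neg h0, loopA, if_neg h1, loopA, if_neg h2, loopA, if_neg h3, loopA, if_neg h4, loopA, if_neg h5, loopA, if_neg h6, loopA, if_neg h7, loopA, if_neg h8, loopA, if_neg h9, loopA, if_pos h10]
                        rw [loopA]
                        simp only [computeAltX, sval0, sval1, sval2, sval3, sval4, sval5, sval6, sval7, sval8, sval9, sval10]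
                        rw [if_neg (show ¬ x + 0 > 7060 by omega)]
                        rw [if_neg (show ¬ x + 67 > 7060 by omega)]
                        rw [if_neg (show ¬ x + 201 > 7060 by omega)]
                        rw [if_neg (show ¬ x + 402 > 7060 by omega)]
                        rw [if_neg (show ¬ x + 670 > 7060 by omega)]
                        rw [if_neg (show ¬ x + 1005 > 7060 by omega)]
                        rw [if_neg (show ¬ x + 1407 > 7060 by omega)]
                        rw [if_neg (show ¬ x + 1876 > 7060 by omega)]
                        rw [if_neg (show ¬ x + 2412 > 7060 by omega)]
                        rw [if_neg (show ¬ x + 3015 > 7060 by omega)]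
                        rw [if_pos (show x + 3685 > 7060 by omega)]
                        simp only [pymod_eq]
                        omega
                      · rw [loopA, if_neg h0, loopA, if_neg h1, loopA, if_neg h2, loopA, if_neg h3, loopA, if_neg h4, loopA, if_neg h5, loopA, if_neg h6, loopA, if_neg h7, loopA, if_neg h8, loopA, if_neg h9, loopA, if_neg h10, loopA]
                        simp only [computeAltX, sval0, sval1, sval2, sval3, sval4, sval5, sval6, sval7, sval8, sval9, sval10]
                        rw [if_neg (show ¬ x + 0 > 7060 by omega)]
                        rw [if_neg (show ¬ x + 67 > 7060 by omega)]
                        rw [if_neg (show ¬ x + 201 > 7060 by omega)]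
                        rw [if_neg (show ¬ x + 402 > 7060 by omega)]
                        rw [if_neg (show ¬ x + 670 > 7060 by omega)]
                        rw [if_neg (show ¬ x + 1005 > 7060 by omega)]
                        rw [if_neg (show ¬ x + 1407 > 7060 by omega)]
                        rw [if_neg (show ¬ x + 1876 > 7060 by omega)]
                        rw [if_neg (show ¬ x + 2412 > 7060 by omega)]
                        rw [if_neg (show ¬ x + 3015 > 7060 by omega)]
                        rw [if_neg (show ¬ x + 3685 > 7060 by omega)]
                        omega

-- ===== VERDICT (by name: the statement is the Claim_ definition above) =====
theorem compute_20_6_spec : Claim_equal_compute_20_6 := by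
  intro a b c _
  simp only [Spec_compute_20_6, compute_20_6, compute_20_6_alt, pyRange_0_11]
  have h := keyMain (a * 359 + b * 304) (c * 253 - a * 210)
  omega
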